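-- pv_equiv track=rewrite | github.com/junix/crf_segment | corpus.py | load_charset
-- ===== SOURCE A (Python) =====
-- from collections import Counter
--
-- def load_charset(training_set, min_freq=2):
--     def _char_seq():
--         for sentence, _tag in training_set:
--             yield from sentence
--
--     return set(
--         ch for ch, freq in Counter(_char_seq()).items()
--         if freq >= min_freq
--     )
-- ===== SOURCE B (Python) =====
-- def load_charset(training_set, min_freq=2):
--     chars = [ch for sentence, _tag in training_set for ch in sentence]
--     result = set()
--     while chars:
--         ch = chars[0]
--         rest = [c for c in chars if c != ch]
--         if len(chars) - len(rest) >= min_freq: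
--             result.add(ch)
--         chars = rest
--     return result
-- ===== Notes on version B (the rewrite author's own statement) =====
-- stated objective: alternative
-- what changed: Replaces Counter hash-counting by successive partition extraction: a worklist loop takes the first remaining char, strips all its occurrences from the shrinking list, reads its frequency off the length difference, and adds it if it meets the threshold - no frequency map or per-char count is ever built.
import Mathlib
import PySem

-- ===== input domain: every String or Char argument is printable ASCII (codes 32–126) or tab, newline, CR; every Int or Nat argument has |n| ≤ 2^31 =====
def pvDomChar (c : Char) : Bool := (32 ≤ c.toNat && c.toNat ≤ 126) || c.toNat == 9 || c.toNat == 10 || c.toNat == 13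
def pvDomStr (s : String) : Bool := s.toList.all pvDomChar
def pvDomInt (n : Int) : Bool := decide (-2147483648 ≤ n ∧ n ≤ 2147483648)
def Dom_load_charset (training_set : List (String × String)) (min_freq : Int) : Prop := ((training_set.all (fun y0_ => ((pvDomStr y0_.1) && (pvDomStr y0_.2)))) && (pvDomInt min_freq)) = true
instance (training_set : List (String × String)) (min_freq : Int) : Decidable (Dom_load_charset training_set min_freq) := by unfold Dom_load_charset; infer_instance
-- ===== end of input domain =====

-- B replaces A's Counter frequency dict by a shrinking-worklist partition loop: extract each distinct char's occurrences and read its frequency off the length difference (alternative decomposition, same return value).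


-- ===== PORT A =====
-- Counter over the generator of all chars of all sentences, then set of chars with freq >= min_freq.
def load_charset (training_set : List (String × String)) (min_freq : Int) : List String :=
  let chars : List Char := training_set.flatMap (fun p => p.1.toList)
  PySem.Set.ofList
    (((PySem.Dict.counter chars).items.filter (fun p => min_freq ≤ p.2)).map
      (fun p => String.ofList [p.1]))

-- ===== PORT B =====
-- while chars: take chars[0], strip its occurrences, frequency = length difference.
def pvLoop (chars : List Char) (min_freq : Int) (result : PySem.Set String) : List String :=
  match chars with
  | [] => result
  | ch :: tl =>
    let rest := (ch :: tl).filter (fun c => c ≠ ch)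
    let result' :=
      if min_freq ≤ (((ch :: tl).length : Int) - (rest.length : Int)) then
        PySem.Set.add result (String.ofList [ch])
      else result
    pvLoop rest min_freq result'
termination_by chars.length
decreasing_by
  have := List.length_filter_le (fun c => decide (c ≠ ch)) tl
  simp only [List.filter_cons, ne_eq, not_true_eq_false, decide_false, if_false,
    Bool.false_eq_true, List.length_cons]
  simp only [ne_eq, decide_not] at this ⊢
  omega

def load_charset_alt (training_set : List (String × String)) (min_freq : Int) : List String :=
  let chars : List Char := training_set.flatMap (fun p => p.1.toList)
  pvLoop chars min_freq PySem.Set.empty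

-- ===== PRECONDITION & SPEC =====
def Spec_load_charset (training_set : List (String × String)) (min_freq : Int) (out : List String) : Prop := out = load_charset_alt training_set min_freq
instance (training_set : List (String × String)) (min_freq : Int) (out : List String) : Decidable (Spec_load_charset training_set min_freq out) := by unfold Spec_load_charset; infer_instance

-- ===== CLAIM (what is proved, stated in full; the proofs are below) =====
def Claim_equal_load_charset : Prop := ∀ (training_set : List (String × String)) (min_freq : Int), Dom_load_charset training_set min_freq → Spec_load_charset training_set min_freq (load_charset training_set min_freq)

-- ===== LEMMAS AND PROOFS =====

theorem pv_mk_inj : Function.Injective (fun ch : Char => String.ofList [ch]) := by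
  intro a b h
  simpa using congrArg String.toList h

-- A's value, characterised: first-occurrence-deduped chars filtered by count, mapped to strings.
theorem pv_key (chars : List Char) (mf : Int) :
    PySem.Set.ofList
      (((PySem.Dict.counter chars).items.filter (fun p => mf ≤ p.2)).map
        (fun p => String.ofList [p.1])) =
    ((PySem.List.dedup chars).filter (fun ch => mf ≤ (chars.count ch : Int))).map
      (fun ch => String.ofList [ch]) := by
  have h1 : ((PySem.Dict.counter chars).items.filter (fun p => mf ≤ p.2)).map
      (fun p => String.ofList [p.1]) =
      ((PySem.List.dedup chars).filter (fun ch => mf ≤ (chars.count ch : Int))).map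
        (fun ch => String.ofList [ch]) := by
    rw [PySem.Dict.items_counter, List.filter_map, List.map_map, ← PySem.List.dedup_eq_ofList]
    rfl
  rw [h1]
  refine PySem.Set.ofList_eq_self_of_nodup _ (List.Nodup.map pv_mk_inj ?_)
  exact List.filter_sublist.nodup (PySem.List.nodup_dedup chars)

-- foldl add ignores elements already in the accumulator
theorem pv_foldl_add_filter (ys : List Char) (x : Char) :
    ∀ s : PySem.Set Char, x ∈ s →
      List.foldl PySem.Set.add s ys =
        List.foldl PySem.Set.add s (ys.filter (fun c => c ≠ x)) := by
  induction ys with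
  | nil => intro s _; rfl
  | cons y ys ih =>
    intro s hx
    by_cases hyx : y = x
    · subst hyx
      simp only [List.filter_cons, ne_eq, not_true_eq_false, decide_false, List.foldl_cons]
      rw [PySem.Set.add_of_mem hx]
      exact ih s hx
    · simp only [List.filter_cons, ne_eq, hyx, not_false_eq_true, decide_true, List.foldl_cons]
      exact ih _ ((PySem.Set.mem_add _ _ _).2 (Or.inl hx))

-- prepending an element absent from ys commutes with the fold
theorem pv_foldl_add_cons (ys : List Char) :
    ∀ (s : PySem.Set Char) (x : Char), x ∉ ys →
      List.foldl PySem.Set.add (x :: s) ys = x :: List.foldl PySem.Set.add s ys := by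
  induction ys with
  | nil => intro s x _; rfl
  | cons y ys ih =>
    intro s x hx
    have hyx : y ≠ x := fun h => hx (h ▸ List.mem_cons_self)
    have hstep : PySem.Set.add (x :: s) y = x :: PySem.Set.add s y := by
      rw [PySem.Set.add_eq_ite, PySem.Set.add_eq_ite]
      by_cases hy : y ∈ s
      · simp [hy, List.mem_cons, hyx]
      · simp [hy, List.mem_cons, hyx]
    simp only [List.foldl_cons, hstep]
    exact ih _ x (fun h => hx (List.mem_cons_of_mem _ h))

-- dedup's first-occurrence recursion
theorem pv_dedup_cons (x : Char) (t : List Char) :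
    PySem.List.dedup (x :: t) = x :: PySem.List.dedup (t.filter (fun c => c ≠ x)) := by
  have h0 : PySem.List.dedup (x :: t) = List.foldl PySem.Set.add [x] t := by
    simp only [PySem.List.dedup_eq_ofList, PySem.Set.ofList_eq_foldl, List.foldl_cons]
    rfl
  rw [h0, pv_foldl_add_filter t x (s := [x]) (List.mem_singleton.2 rfl),
    pv_foldl_add_cons _ [] x (by simp)]
  simp [PySem.List.dedup_eq_ofList, PySem.Set.ofList_eq_foldl]

theorem pv_count_filter (chars : List Char) (ch : Char) :
    chars.count ch + (chars.filter (fun c => c ≠ ch)).length = chars.length := by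
  induction chars with
  | nil => rfl
  | cons y t ih =>
    simp only [ne_eq, decide_not] at ih ⊢
    by_cases h : y = ch
    · simp [h]
      omega
    · simp [h]
      omega

theorem pvLoop_cons (ch : Char) (tl : List Char) (mf : Int) (acc : PySem.Set String) :
    pvLoop (ch :: tl) mf acc =
      pvLoop ((ch :: tl).filter (fun c => c ≠ ch)) mf
        (if mf ≤ (((ch :: tl).length : Int) - (((ch :: tl).filter (fun c => c ≠ ch)).length : Int))
          then PySem.Set.add acc (String.ofList [ch]) else acc) := by
  rw [pvLoop.eq_def]

-- loop invariant: pvLoop appends exactly the qualifying distinct chars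
theorem pv_loop_eq (n : Nat) :
    ∀ (chars : List Char), chars.length ≤ n → ∀ (mf : Int) (acc : PySem.Set String),
      (∀ c ∈ chars, String.ofList [c] ∉ acc) →
      pvLoop chars mf acc =
        acc ++ ((PySem.List.dedup chars).filter (fun ch => mf ≤ (chars.count ch : Int))).map
          (fun ch => String.ofList [ch]) := by
  induction n with
  | zero =>
    intro chars hlen mf acc _
    have : chars = [] := List.eq_nil_of_length_eq_zero (Nat.le_zero.1 hlen)
    subst this
    rw [pvLoop.eq_def]
    simp [PySem.List.dedup, PySem.Set.ofList]
  | succ n ih =>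
    intro chars hlen mf acc hacc
    match chars with
    | [] =>
      rw [pvLoop.eq_def]
      simp [PySem.List.dedup, PySem.Set.ofList]
    | ch :: tl =>
      have hfil : (ch :: tl).filter (fun c => c ≠ ch) = tl.filter (fun c => c ≠ ch) := by simp
      have hcnt : (ch :: tl).count ch + ((ch :: tl).filter (fun c => c ≠ ch)).length
          = (ch :: tl).length := pv_count_filter _ _
      have hcond : (mf ≤ (((ch :: tl).length : Int)
            - (((ch :: tl).filter (fun c => c ≠ ch)).length : Int)))
          ↔ (mf ≤ ((ch :: tl).count ch : Int)) := by omega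
      have hlenrest : ((ch :: tl).filter (fun c => c ≠ ch)).length ≤ n := by
        rw [hfil]
        have := List.length_filter_le (fun c => decide (c ≠ ch)) tl
        simp only [List.length_cons] at hlen
        omega
      have hmem_rest : ∀ c ∈ (ch :: tl).filter (fun c => c ≠ ch), c ∈ ch :: tl ∧ c ≠ ch := by
        intro c hc
        rw [List.mem_filter] at hc
        exact ⟨hc.1, by simpa using hc.2⟩
      have hchacc : String.ofList [ch] ∉ acc := hacc ch List.mem_cons_self
      have hded : PySem.List.dedup (ch :: tl)
          = ch :: PySem.List.dedup ((ch :: tl).filter (fun c => c ≠ ch)) := by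
        rw [pv_dedup_cons, ← hfil]
      have hcount_eq : ∀ c ∈ PySem.List.dedup ((ch :: tl).filter (fun c => c ≠ ch)),
          (ch :: tl).count c = ((ch :: tl).filter (fun c => c ≠ ch)).count c := by
        intro c hc
        obtain ⟨hmem, hne⟩ := hmem_rest c ((PySem.List.mem_dedup _ _).1 hc)
        rw [List.count_filter (by simpa using hne)]
      have hfilter_eq :
          (PySem.List.dedup ((ch :: tl).filter (fun c => c ≠ ch))).filter
              (fun c => mf ≤ (((ch :: tl).count c : Int))) =
          (PySem.List.dedup ((ch :: tl).filter (fun c => c ≠ ch))).filter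
              (fun c => mf ≤ ((((ch :: tl).filter (fun c => c ≠ ch)).count c : Int))) := by
        apply List.filter_congr
        intro c hc
        rw [hcount_eq c hc]
      rw [pvLoop_cons, hded]
      by_cases h : mf ≤ ((ch :: tl).count ch : Int)
      · have hsplit : List.filter (fun c => decide (mf ≤ ((ch :: tl).count c : Int)))
            (ch :: PySem.List.dedup ((ch :: tl).filter (fun c => c ≠ ch))) =
            ch :: List.filter (fun c => decide (mf ≤ ((ch :: tl).count c : Int)))
              (PySem.List.dedup ((ch :: tl).filter (fun c => c ≠ ch))) := by
          rw [List.filter_cons, decide_eq_true h]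
          simp
        have hinv : ∀ c ∈ (ch :: tl).filter (fun c => c ≠ ch),
            String.ofList [c] ∉ acc ++ [String.ofList [ch]] := by
          intro c hc hin
          obtain ⟨hmem, hne⟩ := hmem_rest c hc
          rcases List.mem_append.1 hin with h' | h'
          · exact hacc c hmem h'
          · exact hne (pv_mk_inj (List.mem_singleton.1 h'))
        rw [hsplit, if_pos (hcond.mpr h), PySem.Set.add_of_not_mem hchacc,
          ih _ hlenrest mf _ hinv, ← hfilter_eq]
        simp [List.append_assoc]
      · have hsplit : List.filter (fun c => decide (mf ≤ ((ch :: tl).count c : Int)))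
            (ch :: PySem.List.dedup ((ch :: tl).filter (fun c => c ≠ ch))) =
            List.filter (fun c => decide (mf ≤ ((ch :: tl).count c : Int)))
              (PySem.List.dedup ((ch :: tl).filter (fun c => c ≠ ch))) := by
          rw [List.filter_cons, decide_eq_false h]
          simp
        rw [hsplit, if_neg (fun hh => h (hcond.mp hh)),
          ih _ hlenrest mf _ (fun c hc => (hacc c (hmem_rest c hc).1)), ← hfilter_eq]

theorem pv_eq (training_set : List (String × String)) (min_freq : Int) :
    load_charset training_set min_freq = load_charset_alt training_set min_freq := by
  unfold load_charset load_charset_alt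
  rw [pv_key,
    pv_loop_eq (training_set.flatMap (fun p => p.1.toList)).length _ le_rfl _ _ (by simp [PySem.Set.empty])]
  simp [PySem.Set.empty]

-- ===== VERDICT (by name: the statement is the Claim_ definition above) =====
theorem load_charset_spec : Claim_equal_load_charset := by
  intro ts mf _
  unfold Spec_load_charset
  exact pv_eq ts mf
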